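-- pv_equiv track=rewrite | github.com/gsravank/ds-algo | codechef/feb_contest/chorckit_best.py | get_mismatch_pieces
-- ===== SOURCE A (Python) =====
-- def get_mismatch_pieces(string, pretty_string):
--     mismatch_indices = list()
--     for idx in range(len(string)):
--         if string[idx] != pretty_string[idx]:
--             mismatch_indices.append(idx)
--
--     if len(mismatch_indices) == 0:
--         return []
--
--     start_points = [mismatch_indices[0]]
--     ending_points = list()
--
--     for i in range(1, len(mismatch_indices)):
--         elem = mismatch_indices[i]
--         if mismatch_indices[i] - mismatch_indices[i-1] > 1:
--             start_points.append(elem)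
--             ending_points.append(mismatch_indices[i-1])
--     ending_points.append(mismatch_indices[-1])
--
--     mismatch_pieces = [[s, e] for s, e in zip(start_points, ending_points)]
--     return mismatch_pieces
-- ===== SOURCE B (Python) =====
-- def get_mismatch_pieces(string, pretty_string):
--     pieces = []
--     run_start = None
--     for idx in range(len(string)):
--         if string[idx] != pretty_string[idx]:
--             if run_start is None:
--                 run_start = idx
--         else:
--             if run_start is not None:
--                 pieces.append([run_start, idx - 1])
--                 run_start = None
--     if run_start is not None:
--         pieces.append([run_start, len(string) - 1])
--     return pieces
-- ===== Notes on version B (the rewrite author's own statement) =====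
-- stated objective: simpler
-- what changed: Replaces A's three phases (collect all mismatch indices, group them by an index loop over the table, zip start/end lists) with one pass that tracks the current run's start and emits each [start,end] piece directly, no intermediate index table.
import Mathlib
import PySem

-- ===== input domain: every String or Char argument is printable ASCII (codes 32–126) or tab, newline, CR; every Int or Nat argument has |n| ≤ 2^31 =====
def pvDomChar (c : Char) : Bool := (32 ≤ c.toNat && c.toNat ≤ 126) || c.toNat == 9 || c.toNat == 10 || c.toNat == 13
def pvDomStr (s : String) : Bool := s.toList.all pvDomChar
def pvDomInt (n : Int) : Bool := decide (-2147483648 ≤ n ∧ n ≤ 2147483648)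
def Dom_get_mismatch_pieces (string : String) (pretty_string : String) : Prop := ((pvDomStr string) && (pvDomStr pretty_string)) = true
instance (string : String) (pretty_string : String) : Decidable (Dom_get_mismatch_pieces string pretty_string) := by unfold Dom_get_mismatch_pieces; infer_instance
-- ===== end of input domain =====

-- B replaces A's three phases (index table, grouping loop, zip) by one pass that emits each run directly: simpler, no intermediate table.

-- ===== PORT A =====
-- first loop of A: collect the indices where the characters differ
def pvMisLoop (b : Nat → Bool) (n : Nat) : List Int :=
  (List.range n).foldl (fun acc idx => if b idx then acc ++ [(idx : Int)] else acc) []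

-- second loop of A: for i in range(1, len(mis)): split runs, collecting start/end points
def pvGroupLoop (mis : List Int) : List Int × List Int :=
  (List.range' 1 (mis.length - 1)).foldl
    (fun st i =>
      if mis.getD i 0 - mis.getD (i - 1) 0 > 1 then
        (st.1 ++ [mis.getD i 0], st.2 ++ [mis.getD (i - 1) 0])
      else st)
    ([mis.getD 0 0], [])

-- character comparison string[idx] != pretty_string[idx]; exact under Pre_ (both indices in range)
def get_mismatch_pieces (string : String) (pretty_string : String) : List (List Int) :=
  let sl := string.toList
  let pl := pretty_string.toList
  let mismatch_indices := pvMisLoop (fun idx => sl.getD idx ' ' != pl.getD idx ' ') sl.length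
  if mismatch_indices.length = 0 then []
  else
    let se := pvGroupLoop mismatch_indices
    -- mismatch_indices[-1] = last element
    let ending_points := se.2 ++ [mismatch_indices.getD (mismatch_indices.length - 1) 0]
    (se.1.zip ending_points).map (fun p => [p.1, p.2])

-- ===== PORT B =====
-- B's single loop: state = (pieces so far, start of the currently open run or none)
def pvRunLoop (b : Nat → Bool) (n : Nat) : List (List Int) × Option Int :=
  (List.range n).foldl
    (fun st idx =>
      if b idx then
        match st.2 with
        | none => (st.1, some (idx : Int))
        | some r => (st.1, some r)
      else
        match st.2 with
        | some r => (st.1 ++ [[r, (idx : Int) - 1]], none)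
        | none => (st.1, none))
    ([], none)

def get_mismatch_pieces_alt (string : String) (pretty_string : String) : List (List Int) :=
  let sl := string.toList
  let pl := pretty_string.toList
  let st := pvRunLoop (fun idx => sl.getD idx ' ' != pl.getD idx ' ') sl.length
  match st.2 with
  | some r => st.1 ++ [[r, (sl.length : Int) - 1]]
  | none => st.1

-- ===== PRECONDITION & SPEC =====
-- Pre_ excludes exactly the inputs where the Python raises IndexError: pretty_string shorter than string (both A and B raise there).
def Pre_get_mismatch_pieces (string : String) (pretty_string : String) : Prop :=
  string.length ≤ pretty_string.length
instance (string : String) (pretty_string : String) : Decidable (Pre_get_mismatch_pieces string pretty_string) := by unfold Pre_get_mismatch_pieces; infer_instance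

def pvWitness_get_mismatch_pieces : String × String := ("abcd", "axcy")

def Spec_get_mismatch_pieces (string : String) (pretty_string : String) (out : List (List Int)) : Prop := out = get_mismatch_pieces_alt string pretty_string
instance (string : String) (pretty_string : String) (out : List (List Int)) : Decidable (Spec_get_mismatch_pieces string pretty_string out) := by unfold Spec_get_mismatch_pieces; infer_instance

-- ===== CLAIM (what is proved, stated in full; the proofs are below) =====
def Claim_equal_get_mismatch_pieces : Prop := ∀ (string : String) (pretty_string : String), Dom_get_mismatch_pieces string pretty_string → Pre_get_mismatch_pieces string pretty_string → Spec_get_mismatch_pieces string pretty_string (get_mismatch_pieces string pretty_string)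

-- ===== LEMMAS AND PROOFS =====

theorem pvMisLoop_succ (b : Nat → Bool) (n : Nat) :
    pvMisLoop b (n + 1) = pvMisLoop b n ++ (if b n then [(n : Int)] else []) := by
  simp [pvMisLoop, List.range_succ]
  split <;> simp

theorem pvRunLoop_succ (b : Nat → Bool) (n : Nat) :
    pvRunLoop b (n + 1) =
      (if b n then
        match (pvRunLoop b n).2 with
        | none => ((pvRunLoop b n).1, some (n : Int))
        | some r => ((pvRunLoop b n).1, some r)
      else
        match (pvRunLoop b n).2 with
        | some r => ((pvRunLoop b n).1 ++ [[r, (n : Int) - 1]], none)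
        | none => ((pvRunLoop b n).1, none)) := by
  simp [pvRunLoop, List.range_succ]

theorem pvGroupLoop_concat (mis : List Int) (x l : Int) (hl : mis.getLast? = some l) :
    pvGroupLoop (mis ++ [x]) =
      (if x - l > 1 then
        ((pvGroupLoop mis).1 ++ [x], (pvGroupLoop mis).2 ++ [l])
      else pvGroupLoop mis) := by
  have hne : mis ≠ [] := by intro he; rw [he] at hl; simp at hl
  have hlen : 0 < mis.length := List.length_pos_iff.mpr hne
  have hrange : List.range' 1 ((mis ++ [x]).length - 1)
      = List.range' 1 (mis.length - 1) ++ [mis.length] := by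
    have h1 : (mis ++ [x]).length - 1 = (mis.length - 1) + 1 := by simp; omega
    have h2 : 1 + 1 * (mis.length - 1) = mis.length := by omega
    rw [h1, List.range'_concat, h2]
  have hget0 : (mis ++ [x]).getD 0 0 = mis.getD 0 0 := List.getD_append _ _ _ _ hlen
  have hlastD : mis.getD (mis.length - 1) 0 = l := by
    rw [List.getD_eq_getElem?_getD, ← List.getLast?_eq_getElem?, hl]; rfl
  have hx : (mis ++ [x]).getD mis.length 0 = x := by
    rw [List.getD_eq_getElem _ _ (by simp)]; simp
  have hxm : (mis ++ [x]).getD (mis.length - 1) 0 = l := by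
    rw [List.getD_append _ _ _ _ (by omega), hlastD]
  have hinner : ∀ (init : List Int × List Int),
      (List.range' 1 (mis.length - 1)).foldl
        (fun st i =>
          if (mis ++ [x]).getD i 0 - (mis ++ [x]).getD (i - 1) 0 > 1 then
            (st.1 ++ [(mis ++ [x]).getD i 0], st.2 ++ [(mis ++ [x]).getD (i - 1) 0])
          else st) init
      = (List.range' 1 (mis.length - 1)).foldl
        (fun st i =>
          if mis.getD i 0 - mis.getD (i - 1) 0 > 1 then
            (st.1 ++ [mis.getD i 0], st.2 ++ [mis.getD (i - 1) 0])
          else st) init := by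
    intro init
    apply PySem.List.foldl_congr_mem
    intro acc i hi
    have hi' := List.mem_range'_1.mp hi
    have h1 : i < mis.length := by omega
    have h2 : i - 1 < mis.length := by omega
    simp only [List.getD_append _ _ _ _ h1, List.getD_append _ _ _ _ h2]
  unfold pvGroupLoop
  rw [hrange, List.foldl_append, hinner, hget0]
  simp only [List.foldl_cons, List.foldl_nil, hx, hxm]

-- the invariant tying A's two phases to B's single-pass state after n steps
def pvInv (b : Nat → Bool) (n : Nat) : Prop :=
  (pvMisLoop b n = [] ∧ pvRunLoop b n = ([], none)) ∨
  (∃ st en l, pvGroupLoop (pvMisLoop b n) = (st, en) ∧ (pvMisLoop b n).getLast? = some l ∧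
    ((l = (n : Int) - 1 ∧ ∃ st0 r, st = st0 ++ [r] ∧ st0.length = en.length ∧
        pvRunLoop b n = ((st0.zip en).map (fun p => [p.1, p.2]), some r))
     ∨ (l < (n : Int) - 1 ∧ st.length = en.length + 1 ∧
        pvRunLoop b n = ((st.zip (en ++ [l])).map (fun p => [p.1, p.2]), none))))

theorem pvInv_holds (b : Nat → Bool) (n : Nat) : pvInv b n := by
  induction n with
  | zero => exact Or.inl ⟨rfl, rfl⟩
  | succ n ih =>
    by_cases hb : b n
    all_goals rcases ih with ⟨hmis, hrun⟩ | ⟨st, en, l, hgrp, hlast, hcase⟩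
    · -- b n = true, no previous mismatch
      have hmis' : pvMisLoop b (n + 1) = [(n : Int)] := by
        rw [pvMisLoop_succ, hmis, if_pos hb]; rfl
      refine Or.inr ⟨[(n : Int)], [], (n : Int), ?_, ?_, Or.inl ⟨by push_cast; ring,
        [], (n : Int), by simp, rfl, ?_⟩⟩
      · rw [hmis']; unfold pvGroupLoop; simp
      · rw [hmis']; rfl
      · rw [pvRunLoop_succ, hrun, if_pos hb]; rfl
    · -- b n = true, some previous mismatch
      have hmis' : pvMisLoop b (n + 1) = pvMisLoop b n ++ [(n : Int)] := by
        rw [pvMisLoop_succ, if_pos hb]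
      have hlast' : (pvMisLoop b (n + 1)).getLast? = some (n : Int) := by
        rw [hmis']; exact List.getLast?_concat
      rcases hcase with ⟨hl, st0, r, hst, hlen0, hrun⟩ | ⟨hl, hlen, hrun⟩
      · -- open run continues: group state unchanged
        have hgrp' : pvGroupLoop (pvMisLoop b (n + 1)) = (st, en) := by
          rw [hmis', pvGroupLoop_concat _ _ _ hlast, if_neg (by omega)]; exact hgrp
        exact Or.inr ⟨st, en, (n : Int), hgrp', hlast', Or.inl ⟨by push_cast; ring,
          st0, r, hst, hlen0, by rw [pvRunLoop_succ, hrun, if_pos hb]⟩⟩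
      · -- previous run closed: a new run starts at n
        have hgrp' : pvGroupLoop (pvMisLoop b (n + 1)) = (st ++ [(n : Int)], en ++ [l]) := by
          rw [hmis', pvGroupLoop_concat _ _ _ hlast, if_pos (by omega), hgrp]
        refine Or.inr ⟨st ++ [(n : Int)], en ++ [l], (n : Int), hgrp', hlast',
          Or.inl ⟨by push_cast; ring, st, (n : Int), rfl, by simp [hlen], ?_⟩⟩
        rw [pvRunLoop_succ, hrun, if_pos hb]
    · -- b n = false, no previous mismatch
      refine Or.inl ⟨?_, ?_⟩
      · rw [pvMisLoop_succ, hmis, if_neg hb]; rfl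
      · rw [pvRunLoop_succ, hrun, if_neg hb]
    · -- b n = false, some previous mismatch: mis unchanged
      have hmis' : pvMisLoop b (n + 1) = pvMisLoop b n := by
        rw [pvMisLoop_succ, if_neg hb]; simp
      rcases hcase with ⟨hl, st0, r, hst, hlen0, hrun⟩ | ⟨hl, hlen, hrun⟩
      · -- the open run closes: B emits [r, n-1]
        refine Or.inr ⟨st, en, l, by rw [hmis']; exact hgrp, by rw [hmis']; exact hlast,
          Or.inr ⟨by omega, by rw [hst]; simp [hlen0], ?_⟩⟩
        rw [pvRunLoop_succ, hrun, if_neg hb]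
        rw [hst, List.zip_append hlen0, ← hl]
        simp
      · refine Or.inr ⟨st, en, l, by rw [hmis']; exact hgrp, by rw [hmis']; exact hlast,
          Or.inr ⟨by omega, hlen, ?_⟩⟩
        rw [pvRunLoop_succ, hrun, if_neg hb]

theorem pv_main (b : Nat → Bool) (n : Nat) :
    (if (pvMisLoop b n).length = 0 then ([] : List (List Int))
     else
       (((pvGroupLoop (pvMisLoop b n)).1.zip
         ((pvGroupLoop (pvMisLoop b n)).2 ++ [(pvMisLoop b n).getD ((pvMisLoop b n).length - 1) 0])).map
         (fun p => [p.1, p.2]))) =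
    (match (pvRunLoop b n).2 with
     | some r => (pvRunLoop b n).1 ++ [[r, (n : Int) - 1]]
     | none => (pvRunLoop b n).1) := by
  rcases pvInv_holds b n with ⟨hmis, hrun⟩ | ⟨st, en, l, hgrp, hlast, hcase⟩
  · rw [hmis, hrun]; rfl
  · have hne : pvMisLoop b n ≠ [] := by intro he; rw [he] at hlast; simp at hlast
    have hlen : 0 < (pvMisLoop b n).length := List.length_pos_iff.mpr hne
    have hgetlast : (pvMisLoop b n).getD ((pvMisLoop b n).length - 1) 0 = l := by
      rw [List.getD_eq_getElem?_getD, ← List.getLast?_eq_getElem?, hlast]; rfl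
    rw [if_neg (by omega), hgetlast, hgrp]
    rcases hcase with ⟨hl, st0, r, hst, hlen0, hrun⟩ | ⟨hl, hlen2, hrun⟩
    · rw [hrun, hst, List.zip_append hlen0, ← hl]
      simp
    · rw [hrun]

theorem get_mismatch_pieces_spec : Claim_equal_get_mismatch_pieces := by
  intro string pretty_string _ _
  unfold Spec_get_mismatch_pieces get_mismatch_pieces get_mismatch_pieces_alt
  simp only
  exact pv_main (fun idx => string.toList.getD idx ' ' != pretty_string.toList.getD idx ' ') string.toList.length
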